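-- pv_equiv track=rewrite | github.com/ravynsoft/ravynos | Frameworks/CoreText/fontconfig/fc-case/fc-case.py | ucs4_to_utf8
-- ===== SOURCE A (Python) =====
-- def ucs4_to_utf8(ucs4):
--     utf8_rep = []
--
--     if ucs4 < 0x80:
--         utf8_rep.append(ucs4)
--         bits = -6
--     elif ucs4 < 0x800:
--         utf8_rep.append(((ucs4 >> 6) & 0x1F) | 0xC0)
--         bits = 0
--     elif ucs4 < 0x10000:
--         utf8_rep.append(((ucs4 >> 12) & 0x0F) | 0xE0)
--         bits = 6
--     elif ucs4 < 0x200000: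
--         utf8_rep.append(((ucs4 >> 18) & 0x07) | 0xF0)
--         bits = 12
--     elif ucs4 < 0x4000000:
--         utf8_rep.append(((ucs4 >> 24) & 0x03) | 0xF8)
--         bits = 18
--     elif ucs4 < 0x80000000:
--         utf8_rep.append(((ucs4 >> 30) & 0x01) | 0xFC)
--         bits = 24
--     else:
--         return [];
--
--     while bits >= 0:
--         utf8_rep.append(((ucs4 >> bits) & 0x3F) | 0x80)
--         bits-= 6
--
--     return utf8_rep
-- ===== SOURCE B (Python) =====
-- def ucs4_to_utf8(ucs4):
--     # Build the byte sequence back-to-front: peel 6-bit continuation chunks off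
--     # the low end until the residue fits into the lead byte for the current count.
--     if ucs4 < 0x80:
--         return [ucs4]
--     tail = []
--     u = ucs4
--     k = 0
--     while u >= (0x40 >> k):      # residue does not fit a (k+1)-byte lead
--         tail.append((u & 0x3F) | 0x80)
--         u >>= 6
--         k += 1
--         if k >= 6:
--             return []            # needs more than 6 bytes: unencodable
--     return [u | (0x100 - (0x100 >> (k + 1)))] + tail[::-1]
-- ===== Notes on version B (the rewrite author's own statement) =====
-- stated objective: alternative
-- what changed: Instead of classifying ucs4 against the six UTF-8 range thresholds and emitting bytes high-to-low, B builds the sequence back-to-front: it peels 6-bit continuation chunks off the low end until the residue fits the lead byte (loop condition on the shrinking residue, no range table), derives the lead prefix arithmetically from the peel count, and reverses the collected tail.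
import Mathlib
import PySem

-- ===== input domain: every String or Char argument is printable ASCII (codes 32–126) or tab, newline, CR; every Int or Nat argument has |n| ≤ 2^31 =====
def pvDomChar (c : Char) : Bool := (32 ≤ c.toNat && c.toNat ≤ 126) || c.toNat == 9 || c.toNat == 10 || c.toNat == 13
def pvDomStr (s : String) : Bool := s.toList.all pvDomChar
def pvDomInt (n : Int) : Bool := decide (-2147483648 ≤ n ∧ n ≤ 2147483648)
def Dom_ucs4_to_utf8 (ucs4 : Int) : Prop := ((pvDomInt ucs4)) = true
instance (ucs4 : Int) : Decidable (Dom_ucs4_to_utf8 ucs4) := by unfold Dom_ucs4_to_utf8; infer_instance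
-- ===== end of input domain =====

-- B builds the byte sequence back-to-front: instead of classifying ucs4 into one of six
-- ranges and emitting bytes high-to-low, it peels 6-bit continuation chunks off the low
-- end until the residue fits the lead byte, deriving the lead prefix from the peel count;
-- objective: alternative (same O(1) cost). Return values identical on the whole domain.

-- ===== PORT A =====
-- the 'while bits >= 0' loop; 'ucs4 >> bits' on a nonnegative Int bits is ucs4 >>> bits.toNat (exact)
def pvA_loop (ucs4 : Int) (bits : Int) (acc : List Int) : List Int :=
  if bits ≥ 0 then
    pvA_loop ucs4 (bits - 6)
      (acc ++ [PySem.Int.bor (PySem.Int.band (ucs4 >>> bits.toNat) 0x3F) 0x80])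
  else acc
termination_by (bits + 6).toNat
decreasing_by omega

def ucs4_to_utf8 (ucs4 : Int) : List Int :=
  if ucs4 < 0x80 then pvA_loop ucs4 (-6) [ucs4]
  else if ucs4 < 0x800 then
    pvA_loop ucs4 0 [PySem.Int.bor (PySem.Int.band (ucs4 >>> (6 : Nat)) 0x1F) 0xC0]
  else if ucs4 < 0x10000 then
    pvA_loop ucs4 6 [PySem.Int.bor (PySem.Int.band (ucs4 >>> (12 : Nat)) 0x0F) 0xE0]
  else if ucs4 < 0x200000 then
    pvA_loop ucs4 12 [PySem.Int.bor (PySem.Int.band (ucs4 >>> (18 : Nat)) 0x07) 0xF0]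
  else if ucs4 < 0x4000000 then
    pvA_loop ucs4 18 [PySem.Int.bor (PySem.Int.band (ucs4 >>> (24 : Nat)) 0x03) 0xF8]
  else if ucs4 < 0x80000000 then
    pvA_loop ucs4 24 [PySem.Int.bor (PySem.Int.band (ucs4 >>> (30 : Nat)) 0x01) 0xFC]
  else []

-- ===== PORT B =====
-- Source B's while-loop: peel low 6-bit chunks while the residue does not fit the lead byte.
-- 'k >= 6' is checked after incrementing, exactly as in Source B (the byte appended just
-- before a 'return []' is discarded there, so the none-branch drops it too).
def pvB_peel (u : Int) (k : Nat) (tail : List Int) : Option (Int × Nat × List Int) :=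
  if (0x40 : Int) >>> k ≤ u then
    if k + 1 ≥ 6 then none
    else pvB_peel (u >>> (6 : Nat)) (k + 1)
           (tail ++ [PySem.Int.bor (PySem.Int.band u 0x3F) 0x80])
  else some (u, k, tail)
termination_by 6 - k
decreasing_by omega

def ucs4_to_utf8_alt (ucs4 : Int) : List Int :=
  if ucs4 < 0x80 then [ucs4]
  else
    match pvB_peel ucs4 0 [] with
    | none => []
    | some (u, k, tail) =>
        (PySem.Int.bor u (0x100 - ((0x100 : Int) >>> (k + 1)))) :: tail.reverse

-- ===== PRECONDITION & SPEC =====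
def Spec_ucs4_to_utf8 (ucs4 : Int) (out : List Int) : Prop := out = ucs4_to_utf8_alt ucs4
instance (ucs4 : Int) (out : List Int) : Decidable (Spec_ucs4_to_utf8 ucs4 out) := by unfold Spec_ucs4_to_utf8; infer_instance

-- ===== CLAIM =====
def Claim_equal_ucs4_to_utf8 : Prop := ∀ (ucs4 : Int), Dom_ucs4_to_utf8 ucs4 → Spec_ucs4_to_utf8 ucs4 (ucs4_to_utf8 ucs4)

-- ===== LEMMAS AND PROOFS =====
theorem pv_sr_div (a : Int) (n : Nat) : a >>> n = a / 2 ^ n :=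
  Int.shiftRight_eq_div_pow a n

theorem pv_sr_sr (a : Int) (m n : Nat) : (a >>> m) >>> n = a >>> (m + n) := by
  rw [pv_sr_div, pv_sr_div, pv_sr_div,
      Int.ediv_ediv_of_nonneg (show (0:Int) ≤ 2 ^ m by positivity), pow_add]

theorem pv_band31 (a : Int) (h0 : 0 ≤ a) (h : a < 32) : PySem.Int.band a 0x1F = a := by
  rw [PySem.Int.band_of_nonneg h0 (by norm_num)]
  have h1 : a.toNat &&& (0x1F:Int).toNat = a.toNat % 32 := Nat.and_two_pow_sub_one_eq_mod a.toNat 5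
  omega

theorem pv_band15 (a : Int) (h0 : 0 ≤ a) (h : a < 16) : PySem.Int.band a 0x0F = a := by
  rw [PySem.Int.band_of_nonneg h0 (by norm_num)]
  have h1 : a.toNat &&& (0x0F:Int).toNat = a.toNat % 16 := Nat.and_two_pow_sub_one_eq_mod a.toNat 4
  omega

theorem pv_band7 (a : Int) (h0 : 0 ≤ a) (h : a < 8) : PySem.Int.band a 0x07 = a := by
  rw [PySem.Int.band_of_nonneg h0 (by norm_num)]
  have h1 : a.toNat &&& (0x07:Int).toNat = a.toNat % 8 := Nat.and_two_pow_sub_one_eq_mod a.toNat 3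
  omega

theorem pv_band3 (a : Int) (h0 : 0 ≤ a) (h : a < 4) : PySem.Int.band a 0x03 = a := by
  rw [PySem.Int.band_of_nonneg h0 (by norm_num)]
  have h1 : a.toNat &&& (0x03:Int).toNat = a.toNat % 4 := Nat.and_two_pow_sub_one_eq_mod a.toNat 2
  omega

theorem pv_band1 (a : Int) (h0 : 0 ≤ a) (h : a < 2) : PySem.Int.band a 0x01 = a := by
  rw [PySem.Int.band_of_nonneg h0 (by norm_num)]
  have h1 : a.toNat &&& (0x01:Int).toNat = a.toNat % 2 := Nat.and_two_pow_sub_one_eq_mod a.toNat 1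
  omega

-- evaluation of the peel loop on each size class
theorem pvB_peel2 (u : Int) (h1 : 0x80 ≤ u) (h2 : u < 0x800) :
    pvB_peel u 0 [] = some (u >>> (6:Nat), 1,
      [PySem.Int.bor (PySem.Int.band u 0x3F) 0x80]) := by
  rw [pvB_peel, if_pos (by rw [show ((0x40:Int) >>> (0:Nat)) = 64 from by decide]; omega)]
  norm_num
  rw [pvB_peel, if_neg (by
    rw [show ((0x40:Int) >>> (1:Nat)) = 32 from by decide, pv_sr_div]; norm_num; omega)]

theorem pvB_peel3 (u : Int) (h1 : 0x800 ≤ u) (h2 : u < 0x10000) :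
    pvB_peel u 0 [] = some (u >>> (12:Nat), 2,
      [PySem.Int.bor (PySem.Int.band u 0x3F) 0x80,
       PySem.Int.bor (PySem.Int.band (u >>> (6:Nat)) 0x3F) 0x80]) := by
  rw [pvB_peel, if_pos (by rw [show ((0x40:Int) >>> (0:Nat)) = 64 from by decide]; omega)]
  norm_num
  rw [pvB_peel, if_pos (by
    rw [show ((0x40:Int) >>> (1:Nat)) = 32 from by decide, pv_sr_div]; norm_num; omega)]
  norm_num
  rw [pvB_peel, if_neg (by
    rw [show ((0x40:Int) >>> (2:Nat)) = 16 from by decide, pv_sr_sr, pv_sr_div]; norm_num; omega)]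
  simp [pv_sr_sr]

theorem pvB_peel4 (u : Int) (h1 : 0x10000 ≤ u) (h2 : u < 0x200000) :
    pvB_peel u 0 [] = some (u >>> (18:Nat), 3,
      [PySem.Int.bor (PySem.Int.band u 0x3F) 0x80,
       PySem.Int.bor (PySem.Int.band (u >>> (6:Nat)) 0x3F) 0x80,
       PySem.Int.bor (PySem.Int.band (u >>> (12:Nat)) 0x3F) 0x80]) := by
  rw [pvB_peel, if_pos (by rw [show ((0x40:Int) >>> (0:Nat)) = 64 from by decide]; omega)]
  norm_num
  rw [pvB_peel, if_pos (by
    rw [show ((0x40:Int) >>> (1:Nat)) = 32 from by decide, pv_sr_div]; norm_num; omega)]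
  norm_num
  rw [pvB_peel, if_pos (by
    rw [show ((0x40:Int) >>> (2:Nat)) = 16 from by decide, pv_sr_sr, pv_sr_div]; norm_num; omega)]
  norm_num
  rw [pvB_peel, if_neg (by
    rw [show ((0x40:Int) >>> (3:Nat)) = 8 from by decide, pv_sr_sr, pv_sr_sr, pv_sr_div]
    norm_num; omega)]
  simp [pv_sr_sr]

theorem pvB_peel5 (u : Int) (h1 : 0x200000 ≤ u) (h2 : u < 0x4000000) :
    pvB_peel u 0 [] = some (u >>> (24:Nat), 4,
      [PySem.Int.bor (PySem.Int.band u 0x3F) 0x80,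
       PySem.Int.bor (PySem.Int.band (u >>> (6:Nat)) 0x3F) 0x80,
       PySem.Int.bor (PySem.Int.band (u >>> (12:Nat)) 0x3F) 0x80,
       PySem.Int.bor (PySem.Int.band (u >>> (18:Nat)) 0x3F) 0x80]) := by
  rw [pvB_peel, if_pos (by rw [show ((0x40:Int) >>> (0:Nat)) = 64 from by decide]; omega)]
  norm_num
  rw [pvB_peel, if_pos (by
    rw [show ((0x40:Int) >>> (1:Nat)) = 32 from by decide, pv_sr_div]; norm_num; omega)]
  norm_num
  rw [pvB_peel, if_pos (by
    rw [show ((0x40:Int) >>> (2:Nat)) = 16 from by decide, pv_sr_sr, pv_sr_div]; norm_num; omega)]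
  norm_num
  rw [pvB_peel, if_pos (by
    rw [show ((0x40:Int) >>> (3:Nat)) = 8 from by decide, pv_sr_sr, pv_sr_sr, pv_sr_div]
    norm_num; omega)]
  norm_num
  rw [pvB_peel, if_neg (by
    rw [show ((0x40:Int) >>> (4:Nat)) = 4 from by decide, pv_sr_sr, pv_sr_sr, pv_sr_sr, pv_sr_div]
    norm_num; omega)]
  simp [pv_sr_sr]

theorem pvB_peel6 (u : Int) (h1 : 0x4000000 ≤ u) (h2 : u < 0x80000000) :
    pvB_peel u 0 [] = some (u >>> (30:Nat), 5,
      [PySem.Int.bor (PySem.Int.band u 0x3F) 0x80,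
       PySem.Int.bor (PySem.Int.band (u >>> (6:Nat)) 0x3F) 0x80,
       PySem.Int.bor (PySem.Int.band (u >>> (12:Nat)) 0x3F) 0x80,
       PySem.Int.bor (PySem.Int.band (u >>> (18:Nat)) 0x3F) 0x80,
       PySem.Int.bor (PySem.Int.band (u >>> (24:Nat)) 0x3F) 0x80]) := by
  rw [pvB_peel, if_pos (by rw [show ((0x40:Int) >>> (0:Nat)) = 64 from by decide]; omega)]
  norm_num
  rw [pvB_peel, if_pos (by
    rw [show ((0x40:Int) >>> (1:Nat)) = 32 from by decide, pv_sr_div]; norm_num; omega)]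
  norm_num
  rw [pvB_peel, if_pos (by
    rw [show ((0x40:Int) >>> (2:Nat)) = 16 from by decide, pv_sr_sr, pv_sr_div]; norm_num; omega)]
  norm_num
  rw [pvB_peel, if_pos (by
    rw [show ((0x40:Int) >>> (3:Nat)) = 8 from by decide, pv_sr_sr, pv_sr_sr, pv_sr_div]
    norm_num; omega)]
  norm_num
  rw [pvB_peel, if_pos (by
    rw [show ((0x40:Int) >>> (4:Nat)) = 4 from by decide, pv_sr_sr, pv_sr_sr, pv_sr_sr, pv_sr_div]
    norm_num; omega)]
  norm_num
  rw [pvB_peel, if_neg (by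
    rw [show ((0x40:Int) >>> (5:Nat)) = 2 from by decide, pv_sr_sr, pv_sr_sr, pv_sr_sr, pv_sr_sr,
        pv_sr_div]
    norm_num; omega)]
  simp [pv_sr_sr]

theorem pvB_peel_big (u : Int) (h1 : 0x80000000 ≤ u) : pvB_peel u 0 [] = none := by
  rw [pvB_peel, if_pos (by rw [show ((0x40:Int) >>> (0:Nat)) = 64 from by decide]; omega)]
  norm_num
  rw [pvB_peel, if_pos (by
    rw [show ((0x40:Int) >>> (1:Nat)) = 32 from by decide, pv_sr_div]; norm_num; omega)]
  norm_num
  rw [pvB_peel, if_pos (by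
    rw [show ((0x40:Int) >>> (2:Nat)) = 16 from by decide, pv_sr_sr, pv_sr_div]; norm_num; omega)]
  norm_num
  rw [pvB_peel, if_pos (by
    rw [show ((0x40:Int) >>> (3:Nat)) = 8 from by decide, pv_sr_sr, pv_sr_sr, pv_sr_div]
    norm_num; omega)]
  norm_num
  rw [pvB_peel, if_pos (by
    rw [show ((0x40:Int) >>> (4:Nat)) = 4 from by decide, pv_sr_sr, pv_sr_sr, pv_sr_sr, pv_sr_div]
    norm_num; omega)]
  norm_num
  rw [pvB_peel, if_pos (by
    rw [show ((0x40:Int) >>> (5:Nat)) = 2 from by decide, pv_sr_sr, pv_sr_sr, pv_sr_sr, pv_sr_sr,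
        pv_sr_div]
    norm_num; omega)]
  norm_num

theorem pvA_loop_stop (ucs4 : Int) (acc : List Int) : pvA_loop ucs4 (-6) acc = acc := by
  rw [pvA_loop]; norm_num

theorem pvA_loop_0 (ucs4 : Int) (acc : List Int) :
    pvA_loop ucs4 0 acc = acc ++ [PySem.Int.bor (PySem.Int.band (ucs4 >>> (0 : Nat)) 0x3F) 0x80] := by
  rw [pvA_loop]; norm_num [pvA_loop_stop]

theorem pvA_loop_6 (ucs4 : Int) (acc : List Int) :
    pvA_loop ucs4 6 acc = acc ++ [PySem.Int.bor (PySem.Int.band (ucs4 >>> (6 : Nat)) 0x3F) 0x80, PySem.Int.bor (PySem.Int.band (ucs4 >>> (0 : Nat)) 0x3F) 0x80] := by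
  rw [pvA_loop]; norm_num [pvA_loop_0]; simp

theorem pvA_loop_12 (ucs4 : Int) (acc : List Int) :
    pvA_loop ucs4 12 acc = acc ++ [PySem.Int.bor (PySem.Int.band (ucs4 >>> (12 : Nat)) 0x3F) 0x80, PySem.Int.bor (PySem.Int.band (ucs4 >>> (6 : Nat)) 0x3F) 0x80, PySem.Int.bor (PySem.Int.band (ucs4 >>> (0 : Nat)) 0x3F) 0x80] := by
  rw [pvA_loop]; norm_num [pvA_loop_6]; simp

theorem pvA_loop_18 (ucs4 : Int) (acc : List Int) :
    pvA_loop ucs4 18 acc = acc ++ [PySem.Int.bor (PySem.Int.band (ucs4 >>> (18 : Nat)) 0x3F) 0x80, PySem.Int.bor (PySem.Int.band (ucs4 >>> (12 : Nat)) 0x3F) 0x80, PySem.Int.bor (PySem.Int.band (ucs4 >>> (6 : Nat)) 0x3F) 0x80, PySem.Int.bor (PySem.Int.band (ucs4 >>> (0 : Nat)) 0x3F) 0x80] := by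
  rw [pvA_loop]; norm_num [pvA_loop_12]; simp

theorem pvA_loop_24 (ucs4 : Int) (acc : List Int) :
    pvA_loop ucs4 24 acc = acc ++ [PySem.Int.bor (PySem.Int.band (ucs4 >>> (24 : Nat)) 0x3F) 0x80, PySem.Int.bor (PySem.Int.band (ucs4 >>> (18 : Nat)) 0x3F) 0x80, PySem.Int.bor (PySem.Int.band (ucs4 >>> (12 : Nat)) 0x3F) 0x80, PySem.Int.bor (PySem.Int.band (ucs4 >>> (6 : Nat)) 0x3F) 0x80, PySem.Int.bor (PySem.Int.band (ucs4 >>> (0 : Nat)) 0x3F) 0x80] := by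
  rw [pvA_loop]; norm_num [pvA_loop_18]; simp

-- ===== VERDICT =====
theorem ucs4_to_utf8_spec : Claim_equal_ucs4_to_utf8 := by
  intro ucs4 _
  unfold Spec_ucs4_to_utf8 ucs4_to_utf8 ucs4_to_utf8_alt
  by_cases h1 : ucs4 < 0x80
  · simp [h1, pvA_loop_stop]
  by_cases h2 : ucs4 < 0x800
  · have hb : PySem.Int.band (ucs4 >>> (6:Nat)) 0x1F = ucs4 >>> (6:Nat) :=
      pv_band31 _ (by rw [pv_sr_div]; norm_num; omega) (by rw [pv_sr_div]; norm_num; omega)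
    simp only [if_neg h1, if_pos h2, pvA_loop_0, pvB_peel2 ucs4 (by omega) h2]
    simp [hb, show ((0x100:Int) - (0x100:Int) >>> (2:Nat)) = 0xC0 from by decide]
  by_cases h3 : ucs4 < 0x10000
  · have hb : PySem.Int.band (ucs4 >>> (12:Nat)) 0x0F = ucs4 >>> (12:Nat) :=
      pv_band15 _ (by rw [pv_sr_div]; norm_num; omega) (by rw [pv_sr_div]; norm_num; omega)
    simp only [if_neg h1, if_neg h2, if_pos h3, pvA_loop_6, pvB_peel3 ucs4 (by omega) h3]
    simp [hb, show ((0x100:Int) - (0x100:Int) >>> (3:Nat)) = 0xE0 from by decide]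
  by_cases h4 : ucs4 < 0x200000
  · have hb : PySem.Int.band (ucs4 >>> (18:Nat)) 0x07 = ucs4 >>> (18:Nat) :=
      pv_band7 _ (by rw [pv_sr_div]; norm_num; omega) (by rw [pv_sr_div]; norm_num; omega)
    simp only [if_neg h1, if_neg h2, if_neg h3, if_pos h4, pvA_loop_12,
      pvB_peel4 ucs4 (by omega) h4]
    simp [hb, show ((0x100:Int) - (0x100:Int) >>> (4:Nat)) = 0xF0 from by decide]
  by_cases h5 : ucs4 < 0x4000000
  · have hb : PySem.Int.band (ucs4 >>> (24:Nat)) 0x03 = ucs4 >>> (24:Nat) :=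
      pv_band3 _ (by rw [pv_sr_div]; norm_num; omega) (by rw [pv_sr_div]; norm_num; omega)
    simp only [if_neg h1, if_neg h2, if_neg h3, if_neg h4, if_pos h5, pvA_loop_18,
      pvB_peel5 ucs4 (by omega) h5]
    simp [hb, show ((0x100:Int) - (0x100:Int) >>> (5:Nat)) = 0xF8 from by decide]
  by_cases h6 : ucs4 < 0x80000000
  · have hb : PySem.Int.band (ucs4 >>> (30:Nat)) 0x01 = ucs4 >>> (30:Nat) :=
      pv_band1 _ (by rw [pv_sr_div]; norm_num; omega) (by rw [pv_sr_div]; norm_num; omega)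
    simp only [if_neg h1, if_neg h2, if_neg h3, if_neg h4, if_neg h5, if_pos h6, pvA_loop_24,
      pvB_peel6 ucs4 (by omega) h6]
    simp [hb, show ((0x100:Int) - (0x100:Int) >>> (6:Nat)) = 0xFC from by decide]
  · simp only [if_neg h1, if_neg h2, if_neg h3, if_neg h4, if_neg h5, if_neg h6,
      pvB_peel_big ucs4 (by omega)]
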